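-- pv_equiv track=rewrite | github.com/elinneriksson/advent-of-code | 2020/06/main.py | part_one
-- ===== SOURCE A (Python) =====
-- def find_groups(data):
--     groups = []
--     group = []
--     for line in data:
--         if line != "":
--             group.append(line)
--         else:
--             groups.append(group)
--             group = []
--
--     groups.append(group)
--
--     return groups
--
-- def part_one(data):
--     groups = find_groups(data)
--     group_count = 0
--
--     for group in groups:
--         found_list = []
--         for row in group:
--             for letter in row:
--                 if letter not in found_list:
--                     found_list.append(letter)
--                     group_count += 1
--
--     return group_count
-- ===== SOURCE B (Python) =====
-- def part_one(data):
--     total = 0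
--     seen = set()
--     for line in data:
--         if line == "":
--             total += len(seen)
--             seen = set()
--         else:
--             seen.update(line)
--     return total + len(seen)
-- ===== Notes on version B (the rewrite author's own statement) =====
-- stated objective: simpler
-- what changed: Single streaming pass with a running set flushed at blank lines, replacing A's two phases (build a list of groups, then count new letters with a membership-scan list and a manual counter).
import Mathlib
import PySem

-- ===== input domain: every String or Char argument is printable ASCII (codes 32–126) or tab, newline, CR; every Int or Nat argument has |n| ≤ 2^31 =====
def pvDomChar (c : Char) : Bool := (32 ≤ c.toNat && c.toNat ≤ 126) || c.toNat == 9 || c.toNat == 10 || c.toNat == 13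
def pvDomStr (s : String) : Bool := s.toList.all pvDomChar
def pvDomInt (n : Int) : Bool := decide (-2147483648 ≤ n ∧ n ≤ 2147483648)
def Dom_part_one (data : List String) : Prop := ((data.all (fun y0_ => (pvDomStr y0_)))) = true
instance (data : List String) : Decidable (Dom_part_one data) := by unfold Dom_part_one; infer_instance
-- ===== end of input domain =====

-- B is one streaming pass with a running set flushed at blank lines (simpler); A builds groups then counts with a membership-scan list.

-- ===== PORT A =====
def findGroups (data : List String) : List (List String) :=
  let st := data.foldl
    (fun (p : List (List String) × List String) line =>
      if line ≠ "" then (p.1, p.2 ++ [line]) else (p.1 ++ [p.2], []))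
    ([], [])
  st.1 ++ [st.2]

def part_one (data : List String) : Int :=
  (findGroups data).foldl
    (fun gc group =>
      (group.foldl
        (fun (p : List Char × Int) row =>
          row.toList.foldl
            (fun (q : List Char × Int) letter =>
              if letter ∈ q.1 then q else (q.1 ++ [letter], q.2 + 1))
            p)
        ([], gc)).2)
    0

-- ===== PORT B =====
def part_one_alt (data : List String) : Int :=
  let st := data.foldl
    (fun (p : Int × PySem.Set Char) line =>
      if line = "" then (p.1 + PySem.Set.len p.2, PySem.Set.empty)
      else (p.1, PySem.Set.update p.2 line.toList))
    (0, PySem.Set.empty)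
  st.1 + PySem.Set.len st.2

-- ===== PRECONDITION & SPEC =====
def Spec_part_one (data : List String) (out : Int) : Prop := out = part_one_alt data
instance (data : List String) (out : Int) : Decidable (Spec_part_one data out) := by unfold Spec_part_one; infer_instance

-- ===== CLAIM (what is proved, stated in full; the proofs are below) =====
def Claim_equal_part_one : Prop := ∀ (data : List String), Dom_part_one data → Spec_part_one data (part_one data)

-- ===== LEMMAS AND PROOFS =====

-- shorthand used only by the proofs: the set of letters of a group accumulated onto s
def pvFg (group : List String) (s : PySem.Set Char) : PySem.Set Char :=
  group.foldl (fun t r => PySem.Set.update t r.toList) s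

-- the summed distinct-letter counts of a list of groups
def pvSumG (gs : List (List String)) : Int :=
  gs.foldl (fun acc g => acc + ((pvFg g []).length : Int)) 0

theorem pvInner (cs : List Char) (found : List Char) (c : Int) :
    cs.foldl (fun (q : List Char × Int) letter =>
        if letter ∈ q.1 then q else (q.1 ++ [letter], q.2 + 1)) (found, c)
    = (PySem.Set.update found cs,
       c + ((PySem.Set.update found cs).length : Int) - found.length) := by
  induction cs generalizing found c with
  | nil => simp [PySem.Set.update]
  | cons a cs ih =>
    simp only [List.foldl_cons]
    by_cases h : a ∈ found
    · have hadd : PySem.Set.add found a = found := by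
        simp [PySem.Set.add, PySem.Set.contains, h]
      rw [if_pos h, ih found c]
      simp [PySem.Set.update, hadd]
    · have hadd : PySem.Set.add found a = found ++ [a] := by
        simp [PySem.Set.add, PySem.Set.contains, h]
      rw [if_neg h, ih (found ++ [a]) (c + 1)]
      simp [PySem.Set.update, hadd]
      ring

theorem pvRow (group : List String) (found : List Char) (c : Int) :
    group.foldl (fun (p : List Char × Int) row =>
        row.toList.foldl (fun (q : List Char × Int) letter =>
          if letter ∈ q.1 then q else (q.1 ++ [letter], q.2 + 1)) p) (found, c)
    = (pvFg group found, c + ((pvFg group found).length : Int) - found.length) := by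
  induction group generalizing found c with
  | nil => simp [pvFg]
  | cons r rs ih =>
    simp only [List.foldl_cons]
    rw [pvInner, ih]
    simp [pvFg]
    ring

theorem pvA_eq (data : List String) : part_one data = pvSumG (findGroups data) := by
  unfold part_one pvSumG
  congr 1
  funext acc g
  rw [pvRow]
  simp

theorem pvSumG_append (gs : List (List String)) (g : List String) :
    pvSumG (gs ++ [g]) = pvSumG gs + ((pvFg g []).length : Int) := by
  simp [pvSumG]

theorem pvMain (data : List String) (gs : List (List String)) (g : List String) :
    (let st := data.foldl
        (fun (p : Int × PySem.Set Char) line =>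
          if line = "" then (p.1 + PySem.Set.len p.2, PySem.Set.empty)
          else (p.1, PySem.Set.update p.2 line.toList))
        (pvSumG gs, pvFg g [])
     st.1 + PySem.Set.len st.2)
    = pvSumG ((data.foldl
        (fun (p : List (List String) × List String) line =>
          if line ≠ "" then (p.1, p.2 ++ [line]) else (p.1 ++ [p.2], []))
        (gs, g)).1
      ++ [(data.foldl
        (fun (p : List (List String) × List String) line =>
          if line ≠ "" then (p.1, p.2 ++ [line]) else (p.1 ++ [p.2], []))
        (gs, g)).2]) := by
  induction data generalizing gs g with
  | nil =>
    simp [pvSumG_append, PySem.Set.len]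
  | cons line rest ih =>
    by_cases h : line = ""
    · subst h
      simp only [List.foldl_cons, ne_eq, not_true_eq_false, if_false]
      have h1 : pvSumG gs + PySem.Set.len (pvFg g []) = pvSumG (gs ++ [g]) := by
        simp [pvSumG_append, PySem.Set.len]
      have h2 : (PySem.Set.empty : PySem.Set Char) = pvFg [] [] := by
        simp [pvFg, PySem.Set.empty]
      rw [h1, h2]
      exact ih (gs ++ [g]) []
    · simp only [List.foldl_cons, ne_eq, h, not_false_eq_true, if_true]
      have h2 : PySem.Set.update (pvFg g []) line.toList = pvFg (g ++ [line]) [] := by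
        simp [pvFg]
      rw [h2]
      exact ih gs (g ++ [line])

-- ===== VERDICT (by name: the statement is the Claim_ definition above) =====
theorem part_one_spec : Claim_equal_part_one := by
  intro data _
  unfold Spec_part_one
  rw [pvA_eq]
  unfold part_one_alt findGroups
  have := pvMain data [] []
  simp only [pvSumG, pvFg, List.foldl_nil] at this
  exact this.symm
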